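-- pv_equiv track=rewrite | github.com/DylanLeisler/PTCGProject | World/scenes/overworld_scene.py | build_basic_area_specs
-- ===== SOURCE A (Python) =====
-- def build_basic_area_specs(width: int, interior_rows: int) -> list[list[str]]:
--     if width < 2:
--         raise ValueError("width must be at least 2")
--     specs: list[list[str]] = []
--     top_row = ["top_left"] + ["top_center"] * (width - 2) + ["top_right"]
--     specs.append(top_row)
--     for _ in range(max(1, interior_rows)):
--         specs.append(["side_center"] + ["floor"] * (width - 2) + ["side_center"])
--     bottom_row = ["bottom_left"] + ["bottom_floor"] * (width - 2) + ["bottom_right"]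
--     specs.append(bottom_row)
--     specs.append(["bottom_center"] * width)
--     specs.append(["bottom_shadow"] * width)
--     return specs
-- ===== SOURCE B (Python) =====
-- def build_basic_area_specs(width: int, interior_rows: int) -> list[list[str]]:
--     if width < 2:
--         raise ValueError("width must be at least 2")
--     n = max(1, interior_rows)
--     total = n + 4
--     specs: list[list[str]] = []
--     for r in range(total):
--         row: list[str] = []
--         for c in range(width):
--             if r == 0:
--                 left, mid, right = "top_left", "top_center", "top_right"
--             elif r <= n:
--                 left, mid, right = "side_center", "floor", "side_center"
--             elif r == n + 1:
--                 left, mid, right = "bottom_left", "bottom_floor", "bottom_right"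
--             elif r == n + 2:
--                 left = mid = right = "bottom_center"
--             else:
--                 left = mid = right = "bottom_shadow"
--             row.append(left if c == 0 else right if c == width - 1 else mid)
--         specs.append(row)
--     return specs
-- ===== Notes on version B (the rewrite author's own statement) =====
-- stated objective: alternative
-- what changed: A concatenates pre-built row lists band by band; B builds the grid positionally with a nested loop over (row, column), classifying each cell by its band and edge position.
import Mathlib
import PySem

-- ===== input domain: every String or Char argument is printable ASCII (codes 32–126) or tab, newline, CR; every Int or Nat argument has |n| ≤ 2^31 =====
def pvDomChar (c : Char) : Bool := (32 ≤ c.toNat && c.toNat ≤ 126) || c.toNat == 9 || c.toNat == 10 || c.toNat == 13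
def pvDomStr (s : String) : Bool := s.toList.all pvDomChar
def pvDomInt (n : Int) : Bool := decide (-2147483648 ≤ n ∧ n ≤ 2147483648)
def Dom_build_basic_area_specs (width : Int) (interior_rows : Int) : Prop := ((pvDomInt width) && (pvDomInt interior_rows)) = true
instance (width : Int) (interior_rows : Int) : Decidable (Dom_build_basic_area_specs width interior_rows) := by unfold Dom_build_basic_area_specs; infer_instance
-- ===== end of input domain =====

-- B builds the grid positionally (nested loop over row/column with a per-cell band
-- classification) instead of A's band-by-band concatenation of pre-built rows.

-- ===== PORT A =====
def build_basic_area_specs (width : Int) (interior_rows : Int) : List (List String) :=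
  -- width < 2 raises ValueError in Python: excluded by Pre_
  let specs : List (List String) := []
  let top_row : List String := ["top_left"] ++ List.replicate (width - 2).toNat "top_center" ++ ["top_right"]
  let specs := specs ++ [top_row]
  let specs := (PySem.List.pyRange 0 (max 1 interior_rows) 1).foldl
    (fun acc _ => acc ++ [["side_center"] ++ List.replicate (width - 2).toNat "floor" ++ ["side_center"]]) specs
  let bottom_row : List String := ["bottom_left"] ++ List.replicate (width - 2).toNat "bottom_floor" ++ ["bottom_right"]
  let specs := specs ++ [bottom_row]
  let specs := specs ++ [List.replicate width.toNat "bottom_center"]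
  let specs := specs ++ [List.replicate width.toNat "bottom_shadow"]
  specs

-- ===== PORT B =====
-- per-cell classification: band by row index r, then edge position by column c
def pvCell (width : Int) (n : Int) (r : Int) (c : Int) : String :=
  let (left, mid, right) :=
    if r = 0 then ("top_left", "top_center", "top_right")
    else if r ≤ n then ("side_center", "floor", "side_center")
    else if r = n + 1 then ("bottom_left", "bottom_floor", "bottom_right")
    else if r = n + 2 then ("bottom_center", "bottom_center", "bottom_center")
    else ("bottom_shadow", "bottom_shadow", "bottom_shadow")
  if c = 0 then left else if c = width - 1 then right else mid

def build_basic_area_specs_alt (width : Int) (interior_rows : Int) : List (List String) :=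
  -- width < 2 raises ValueError in Python: excluded by Pre_
  let n := max 1 interior_rows
  (PySem.List.pyRange 0 (n + 4) 1).map (fun r =>
    (PySem.List.pyRange 0 width 1).map (fun c => pvCell width n r c))

-- ===== PRECONDITION & SPEC =====
-- A (and B) raise ValueError when width < 2; exactly those inputs are excluded.
def Pre_build_basic_area_specs (width : Int) (interior_rows : Int) : Prop := 2 ≤ width
instance (width : Int) (interior_rows : Int) : Decidable (Pre_build_basic_area_specs width interior_rows) := by unfold Pre_build_basic_area_specs; infer_instance
def pvWitness_build_basic_area_specs : Int × Int := (4, 2)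

def Spec_build_basic_area_specs (width : Int) (interior_rows : Int) (out : List (List String)) : Prop := out = build_basic_area_specs_alt width interior_rows
instance (width : Int) (interior_rows : Int) (out : List (List String)) : Decidable (Spec_build_basic_area_specs width interior_rows out) := by unfold Spec_build_basic_area_specs; infer_instance

-- ===== CLAIM (what is proved, stated in full; the proofs are below) =====
def Claim_equal_build_basic_area_specs : Prop := ∀ (width : Int) (interior_rows : Int), Dom_build_basic_area_specs width interior_rows → Pre_build_basic_area_specs width interior_rows → Spec_build_basic_area_specs width interior_rows (build_basic_area_specs width interior_rows)

-- ===== LEMMAS AND PROOFS =====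

/-- Folding "append one constant element per list element" yields init ++ replicate. -/
theorem pv_foldl_append_const {α β : Type} (x : β) :
    ∀ (l : List α) (s : List β),
      l.foldl (fun acc _ => acc ++ [x]) s = s ++ List.replicate l.length x := by
  intro l
  induction l with
  | nil => intro s; simp
  | cons a t ih =>
      intro s
      rw [List.foldl_cons, ih, List.length_cons, List.replicate_succ, List.append_assoc]
      rfl

/-- A map over range (v+2) of an edge/middle-classified cell function equals
    cons / replicate / append. -/
theorem pv_row_shape (v : Nat) (L M R : String) (g : Int → String)
    (hg : ∀ c : Int, 0 ≤ c → c < (v : Int) + 2 →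
      g c = if c = 0 then L else if c = (v : Int) + 1 then R else M) :
    (List.range (v + 2)).map (fun (c : Nat) => g (c : Int)) = L :: (List.replicate v M ++ [R]) := by
  have h1 : List.range (v + 2) = List.range (v + 1) ++ [v + 1] := by
    simpa using List.range_succ (n := v + 1)
  rw [h1, List.map_append]
  rw [List.range_succ_eq_map (n := v)]
  simp only [List.map_cons, List.map_map]
  have h0 : g ((0 : Nat) : Int) = L := by
    rw [Nat.cast_zero, hg 0 (by omega) (by omega)]; simp
  have hR : g ((v + 1 : Nat) : Int) = R := by
    push_cast
    rw [hg ((v : Int) + 1) (by omega) (by omega), if_neg (by omega), if_pos rfl]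
  have hmid : (List.range v).map (fun j => g ((Nat.succ j : Nat) : Int)) = List.replicate v M := by
    have hall : ∀ y ∈ (List.range v).map (fun j => g ((Nat.succ j : Nat) : Int)), y = M := by
      intro y hy
      rcases List.mem_map.mp hy with ⟨j, hj, rfl⟩
      have hjv := List.mem_range.mp hj
      rw [hg ((Nat.succ j : Nat) : Int) (by push_cast; omega) (by push_cast; omega)]
      rw [if_neg (by push_cast; omega), if_neg (by push_cast; omega)]
    calc (List.range v).map (fun j => g ((Nat.succ j : Nat) : Int))
        = List.replicate ((List.range v).map (fun j => g ((Nat.succ j : Nat) : Int))).length M :=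
          List.eq_replicate_of_mem hall
      _ = List.replicate v M := by simp
  rw [show ((fun (c : Nat) => g (c : Int)) ∘ Nat.succ) = (fun j : Nat => g ((Nat.succ j : Nat) : Int)) from rfl]
  rw [hmid, h0, hR]
  simp

/-- pyRange 0 m 1 mapped, rewritten to a Nat range map. -/
theorem pv_pyRange_map {α : Type} (m : Nat) (b : Int) (hb : b = (m : Int)) (g : Int → α) :
    (PySem.List.pyRange 0 b 1).map g = (List.range m).map (fun (j : Nat) => g (j : Int)) := by
  rw [hb, PySem.List.pyRange_one]
  simp [List.map_map, Function.comp]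

theorem pv_replicate_split {α : Type} (v : Nat) (x : α) :
    List.replicate (v + 2) x = x :: (List.replicate v x ++ [x]) := by
  rw [List.replicate_succ, List.replicate_succ']

-- ===== VERDICT (by name: the statement is the Claim_ definition above) =====
theorem build_basic_area_specs_spec : Claim_equal_build_basic_area_specs := by
  intro width interior_rows _ hpre
  unfold Spec_build_basic_area_specs build_basic_area_specs build_basic_area_specs_alt
  dsimp only
  have hw : (2 : Int) ≤ width := hpre
  set n : Int := max 1 interior_rows with hn
  have hn1 : (1 : Int) ≤ n := le_max_left _ _
  obtain ⟨v, hv⟩ : ∃ v : Nat, width = (v : Int) + 2 := ⟨(width - 2).toNat, by omega⟩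
  obtain ⟨k, hk⟩ : ∃ k : Nat, n = (k : Int) + 1 := ⟨(n - 1).toNat, by omega⟩
  have hwt : width.toNat = v + 2 := by omega
  have hvt : (width - 2).toNat = v := by omega
  clear hn
  clear_value n
  -- A side: foldl ↦ replicate
  rw [pv_foldl_append_const, PySem.List.length_pyRange_one,
      show (n - 0).toNat = k + 1 from by omega, hvt, hwt]
  -- B side: pyRange ↦ Nat range
  rw [pv_pyRange_map (k + 5) (n + 4) (by omega)]
  -- the generic row of band (L, M, R)
  have hrow : ∀ (r : Int) (L M R : String),
      (∀ c : Int, pvCell width n r c = if c = 0 then L else if c = width - 1 then R else M) →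
      (PySem.List.pyRange 0 width 1).map (fun c => pvCell width n r c) =
        L :: (List.replicate v M ++ [R]) := by
    intro r L M R hband
    rw [pv_pyRange_map (v + 2) width (by omega)]
    apply pv_row_shape
    intro c _ _
    rw [hband c, show width - 1 = (v : Int) + 1 from by push_cast; omega]
  -- evaluate each band of pvCell
  have htop : ∀ c : Int, pvCell width n 0 c =
      if c = 0 then "top_left" else if c = width - 1 then "top_right" else "top_center" := by
    intro c; unfold pvCell; rw [if_pos rfl]
  have hint : ∀ (r : Int), r ≠ 0 → r ≤ n → ∀ c : Int, pvCell width n r c =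
      if c = 0 then "side_center" else if c = width - 1 then "side_center" else "floor" := by
    intro r h0 h1 c; unfold pvCell; rw [if_neg h0, if_pos h1]
  have hbot : ∀ c : Int, pvCell width n (n + 1) c =
      if c = 0 then "bottom_left" else if c = width - 1 then "bottom_right" else "bottom_floor" := by
    intro c; unfold pvCell
    rw [if_neg (show ¬ n + 1 = 0 by omega), if_neg (show ¬ n + 1 ≤ n by omega), if_pos rfl]
  have hbc : ∀ c : Int, pvCell width n (n + 2) c =
      if c = 0 then "bottom_center" else if c = width - 1 then "bottom_center" else "bottom_center" := by
    intro c; unfold pvCell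
    rw [if_neg (show ¬ n + 2 = 0 by omega), if_neg (show ¬ n + 2 ≤ n by omega),
        if_neg (show ¬ n + 2 = n + 1 by omega), if_pos rfl]
  have hbs : ∀ c : Int, pvCell width n (n + 3) c =
      if c = 0 then "bottom_shadow" else if c = width - 1 then "bottom_shadow" else "bottom_shadow" := by
    intro c; unfold pvCell
    rw [if_neg (show ¬ n + 3 = 0 by omega), if_neg (show ¬ n + 3 ≤ n by omega),
        if_neg (show ¬ n + 3 = n + 1 by omega), if_neg (show ¬ n + 3 = n + 2 by omega)]
  -- peel the outer range: k+5 = 1 (top) + (k+1) interior + 3 bottom rows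
  have h5 : List.range (k + 5) =
      (0 :: (List.range (k + 1)).map Nat.succ) ++ [k + 2, k + 3, k + 4] := by
    rw [show k + 5 = (k + 4) + 1 from rfl, List.range_succ,
        show k + 4 = (k + 3) + 1 from rfl, List.range_succ,
        show k + 3 = (k + 2) + 1 from rfl, List.range_succ,
        List.range_succ_eq_map (n := k + 1)]
    simp
  rw [h5, List.map_append, List.map_cons, List.map_map]
  -- interior rows are all identical
  have hintRow : (List.range (k + 1)).map
        ((fun j : Nat => (PySem.List.pyRange 0 width 1).map (fun c => pvCell width n (j : Int) c)) ∘ Nat.succ)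
      = List.replicate (k + 1)
          ("side_center" :: (List.replicate v "floor" ++ ["side_center"])) := by
    have hall : ∀ y ∈ (List.range (k + 1)).map
        ((fun j : Nat => (PySem.List.pyRange 0 width 1).map (fun c => pvCell width n (j : Int) c)) ∘ Nat.succ),
        y = "side_center" :: (List.replicate v "floor" ++ ["side_center"]) := by
      intro y hy
      rcases List.mem_map.mp hy with ⟨j, hj, rfl⟩
      have hjk := List.mem_range.mp hj
      simp only [Function.comp]
      exact hrow ((Nat.succ j : Nat) : Int) _ _ _
        (hint _ (by push_cast; omega) (by push_cast; omega))
    calc _ = List.replicate ((List.range (k + 1)).map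
          ((fun j : Nat => (PySem.List.pyRange 0 width 1).map (fun c => pvCell width n (j : Int) c)) ∘ Nat.succ)).length
          ("side_center" :: (List.replicate v "floor" ++ ["side_center"])) :=
        List.eq_replicate_of_mem hall
      _ = _ := by simp
  rw [hintRow]
  rw [show ((0 : Nat) : Int) = (0 : Int) from rfl]
  rw [hrow 0 _ _ _ htop]
  rw [List.map_cons, List.map_cons, List.map_singleton]
  rw [show ((k + 2 : Nat) : Int) = n + 1 from by push_cast; omega]
  rw [show ((k + 3 : Nat) : Int) = n + 2 from by push_cast; omega]
  rw [show ((k + 4 : Nat) : Int) = n + 3 from by push_cast; omega]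
  rw [hrow (n + 1) _ _ _ hbot, hrow (n + 2) _ _ _ hbc, hrow (n + 3) _ _ _ hbs]
  rw [pv_replicate_split v "bottom_center", pv_replicate_split v "bottom_shadow"]
  simp
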